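-- pv_equiv track=rewrite | github.com/lfvelascot/Analysis-and-design-of-algorithms | PYTHON LOG/PYTHON ADVANGE/ORDENAMIENTO/busquedaTextos.py | busquedaTexto1
-- ===== SOURCE A (Python) =====
-- def busquedaTexto1(texto, busqueda):
-- 	aux= ''
-- 	for i in texto:
-- 		aux = aux+i
-- 		if aux != busqueda[0:len(aux)]:
-- 			aux = ''
-- 		elif aux == busqueda:
-- 			return True
-- 	return False
-- ===== SOURCE B (Python) =====
-- def busquedaTexto1(texto, busqueda):
--     if not busqueda:
--         return False
--     j = 0
--     n = len(busqueda)
--     for c in texto: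
--         if c == busqueda[j]:
--             j += 1
--             if j == n:
--                 return True
--         else:
--             j = 0
--     return False
-- ===== Notes on version B (the rewrite author's own statement) =====
-- stated objective: faster
-- what changed: Replace the accumulated-prefix string with an integer match-length state: each character is compared to one character of busqueda (reset to 0 on mismatch, exactly A's no-backtracking behaviour), removing the O(len(aux)) slice-and-compare per step.
import Mathlib
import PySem

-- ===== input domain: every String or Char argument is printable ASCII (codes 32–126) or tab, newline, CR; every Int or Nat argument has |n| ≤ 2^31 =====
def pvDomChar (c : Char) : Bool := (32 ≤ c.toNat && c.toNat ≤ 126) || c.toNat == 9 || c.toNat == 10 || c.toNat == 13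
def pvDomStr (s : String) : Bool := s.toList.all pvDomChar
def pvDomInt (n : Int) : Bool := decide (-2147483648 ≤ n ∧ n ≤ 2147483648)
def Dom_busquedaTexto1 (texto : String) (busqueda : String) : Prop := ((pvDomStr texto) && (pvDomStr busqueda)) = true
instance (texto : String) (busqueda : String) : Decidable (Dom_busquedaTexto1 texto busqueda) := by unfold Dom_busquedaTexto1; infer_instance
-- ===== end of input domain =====

-- B replaces A's growing prefix string (sliced and compared each step) with an integer
-- match-length state, keeping A's exact reset-on-mismatch (no backtracking) behaviour.
-- ===== PORT A =====
-- loop of A: state aux (the accumulated candidate prefix), chars of texto in order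
def pvA_go (t : List Char) (b : List Char) (aux : List Char) : Bool :=
  match t with
  | [] => false
  | c :: rest =>
    let aux' := aux ++ [c]
    if aux' ≠ b.take aux'.length then pvA_go rest b []
    else if aux' = b then true
    else pvA_go rest b aux'

def busquedaTexto1 (texto : String) (busqueda : String) : Bool :=
  pvA_go texto.toList busqueda.toList []

-- ===== PORT B =====
-- loop of B: state j (length of the current match); busqueda[j] is in range since j < n throughout
def pvB_go (t : List Char) (b : List Char) (j : Nat) : Bool :=
  match t with
  | [] => false
  | c :: rest =>
    if b[j]? = some c then
      if j + 1 = b.length then true else pvB_go rest b (j + 1)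
    else pvB_go rest b 0

def busquedaTexto1_alt (texto : String) (busqueda : String) : Bool :=
  if busqueda.toList.isEmpty then false
  else pvB_go texto.toList busqueda.toList 0

-- ===== PRECONDITION & SPEC =====
def Spec_busquedaTexto1 (texto : String) (busqueda : String) (out : Bool) : Prop := out = busquedaTexto1_alt texto busqueda
instance (texto : String) (busqueda : String) (out : Bool) : Decidable (Spec_busquedaTexto1 texto busqueda out) := by unfold Spec_busquedaTexto1; infer_instance

-- ===== CLAIM (what is proved, stated in full; the proofs are below) =====
def Claim_equal_busquedaTexto1 : Prop := ∀ (texto : String) (busqueda : String), Dom_busquedaTexto1 texto busqueda → Spec_busquedaTexto1 texto busqueda (busquedaTexto1 texto busqueda)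

-- ===== LEMMAS AND PROOFS =====

-- ===== VERDICT (by name: the statement is the Claim_ definition above) =====
-- A with empty busqueda: every step resets (nonempty aux' never equals the empty prefix)
theorem pvA_go_nil (t : List Char) : pvA_go t [] [] = false := by
  induction t with
  | nil => rfl
  | cons c rest ih => simp [pvA_go, ih]

-- invariant: A's aux is always busqueda.take j with j < |busqueda|; then the two loops agree
theorem pv_go_eq (t : List Char) (b : List Char) (hb : b ≠ []) :
    ∀ j, j < b.length → pvA_go t b (b.take j) = pvB_go t b j := by
  induction t with
  | nil => intro j hj; rfl
  | cons c rest ih =>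
    intro j hj
    have hlen : (b.take j ++ [c]).length = j + 1 := by
      simp [Nat.min_eq_left (Nat.le_of_lt hj)]
    have htake : b.take (j + 1) = b.take j ++ [b[j]] := by
      rw [List.take_add_one, List.getElem?_eq_getElem hj]; rfl
    have hget : b[j]? = some b[j] := List.getElem?_eq_getElem hj
    by_cases hc : c = b[j]
    · have heq : b.take j ++ [c] = b.take (j + 1) := by rw [htake, hc]
      by_cases hend : j + 1 = b.length
      · have hfull : b.take j ++ [c] = b := by rw [heq, hend, List.take_length]
        simp only [pvA_go, pvB_go, heq]
        rw [if_neg (by simp), if_pos (heq ▸ hfull), if_pos (by rw [hget, hc]), if_pos hend]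
      · have hlt : j + 1 < b.length := Nat.lt_of_le_of_ne hj (by omega)
        have hne : b.take j ++ [c] ≠ b := by
          intro h
          have := congrArg List.length h
          rw [hlen] at this
          omega
        simp only [pvA_go, pvB_go, heq]
        rw [if_neg (by simp), if_neg (heq ▸ hne), if_pos (by rw [hget, hc]), if_neg hend]
        exact ih (j + 1) hlt
    · have hne : b.take j ++ [c] ≠ b.take (j + 1) := by
        rw [htake]
        intro h
        exact hc (List.singleton_inj.mp (List.append_cancel_left h))
      have hgetne : ¬ (b[j]? = some c) := by
        rw [hget]
        intro h
        exact hc (Option.some.inj h).symm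
      simp only [pvA_go, pvB_go, hlen]
      rw [if_pos hne, if_neg hgetne]
      simpa using ih 0 (List.length_pos_of_ne_nil hb)

theorem busquedaTexto1_spec : Claim_equal_busquedaTexto1 := by
  intro texto busqueda _
  unfold Spec_busquedaTexto1 busquedaTexto1 busquedaTexto1_alt
  by_cases hb : busqueda.toList = []
  · simp [hb, pvA_go_nil]
  · rw [if_neg (by simpa [List.isEmpty_iff] using hb)]
    have h0 : (0 : Nat) < busqueda.toList.length := List.length_pos_of_ne_nil hb
    simpa using pv_go_eq texto.toList busqueda.toList hb 0 h0
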